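-- pv_equiv track=rewrite | github.com/CodeAvali/ChessAI-V2 | main.py | flag_the_map
-- ===== SOURCE A (Python) =====
-- def flag_the_map(White_moves, Black_moves):
--
--   flag_map = [[(0,0),(0,0),(0,0),(0,0),(0,0),(0,0),(0,0),(0,0)],                #Basic flagging - likely inefficent.
--              [(0,0),(0,0),(0,0),(0,0),(0,0),(0,0),(0,0),(0,0)],                 #Leads to inconsitences as has to be applied end of turn
--              [(0,0),(0,0),(0,0),(0,0),(0,0),(0,0),(0,0),(0,0)],                 #NEEDS TO BE ADAPTIVE. AAAAAAAAAAAAA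
--              [(0,0),(0,0),(0,0),(0,0),(0,0),(0,0),(0,0),(0,0)],
--              [(0,0),(0,0),(0,0),(0,0),(0,0),(0,0),(0,0),(0,0)],
--              [(0,0),(0,0),(0,0),(0,0),(0,0),(0,0),(0,0),(0,0)],
--              [(0,0),(0,0),(0,0),(0,0),(0,0),(0,0),(0,0),(0,0)],
--              [(0,0),(0,0),(0,0),(0,0),(0,0),(0,0),(0,0),(0,0)]]
--
--   for i in range(len(White_moves)):
--     x_value = White_moves[i][1][0]
--     y_value = White_moves[i][1][1]
--     data = flag_map[y_value][x_value]
--     data = (int(data[0]) + 1, data[1])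
--     flag_map[y_value][x_value] = data
--
--   for j in range(len(Black_moves)):
--     x_value = Black_moves[j][1][0]
--     y_value = Black_moves[j][1][1]
--     data = flag_map[y_value][x_value]
--     data = (data[0], int(data[1]) + 1)
--     flag_map[y_value][x_value] = data
--
--   return flag_map
-- ===== SOURCE B (Python) =====
-- def flag_the_map(White_moves, Black_moves):
--     # Aggregate first: count moves per destination square, then write each
--     # total into the 8x8 grid by direct indexing (so behaviour on negative /
--     # out-of-range coordinates is Python list indexing, as in the original).
--     white_counts = {}
--     for move in White_moves:
--         dest = move[1]
--         white_counts[dest] = white_counts.get(dest, 0) + 1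
--     black_counts = {}
--     for move in Black_moves:
--         dest = move[1]
--         black_counts[dest] = black_counts.get(dest, 0) + 1
--
--     flag_map = [[(0, 0)] * 8 for _ in range(8)]
--     for (x, y), n in white_counts.items():
--         w, b = flag_map[y][x]
--         flag_map[y][x] = (w + n, b)
--     for (x, y), n in black_counts.items():
--         w, b = flag_map[y][x]
--         flag_map[y][x] = (w, b + n)
--     return flag_map
-- ===== Notes on version B (the rewrite author's own statement) =====
-- stated objective: alternative
-- what changed: B replaces A's per-move in-place grid increments with an aggregation phase (one counting dict per colour keyed on the destination square) followed by a sparse write phase that adds each aggregated total into the 8x8 grid by direct indexing.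
import Mathlib
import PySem

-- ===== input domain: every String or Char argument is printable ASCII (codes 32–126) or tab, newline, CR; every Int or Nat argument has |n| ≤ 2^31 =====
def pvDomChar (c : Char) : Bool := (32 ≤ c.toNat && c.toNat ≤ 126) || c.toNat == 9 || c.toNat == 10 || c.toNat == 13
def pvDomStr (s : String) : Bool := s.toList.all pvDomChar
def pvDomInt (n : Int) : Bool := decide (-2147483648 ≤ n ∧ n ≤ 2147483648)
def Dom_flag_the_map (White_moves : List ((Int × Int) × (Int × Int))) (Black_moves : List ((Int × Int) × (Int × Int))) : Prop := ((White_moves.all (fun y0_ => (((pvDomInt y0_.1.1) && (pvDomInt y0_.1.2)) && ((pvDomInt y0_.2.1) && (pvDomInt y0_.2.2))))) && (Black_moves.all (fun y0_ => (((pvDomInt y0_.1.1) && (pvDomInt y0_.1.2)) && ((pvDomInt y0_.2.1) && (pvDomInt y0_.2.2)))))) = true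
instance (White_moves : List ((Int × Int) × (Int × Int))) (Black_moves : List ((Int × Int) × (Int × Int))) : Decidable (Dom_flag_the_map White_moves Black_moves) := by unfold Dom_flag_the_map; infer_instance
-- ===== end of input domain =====

-- B replaces A's per-move in-place grid increments with an aggregation phase (a counting dict
-- per colour keyed on the destination square) followed by a sparse write phase adding the totals
-- into the grid; equivalence is about the return value (neither version mutates its arguments).

-- ===== PORT A =====
-- the literal 8x8 grid of (0,0) from A's source; A's loops index it with Python semantics
def pvGridA : List (List (Int × Int)) :=
  [[(0,0),(0,0),(0,0),(0,0),(0,0),(0,0),(0,0),(0,0)],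
   [(0,0),(0,0),(0,0),(0,0),(0,0),(0,0),(0,0),(0,0)],
   [(0,0),(0,0),(0,0),(0,0),(0,0),(0,0),(0,0),(0,0)],
   [(0,0),(0,0),(0,0),(0,0),(0,0),(0,0),(0,0),(0,0)],
   [(0,0),(0,0),(0,0),(0,0),(0,0),(0,0),(0,0),(0,0)],
   [(0,0),(0,0),(0,0),(0,0),(0,0),(0,0),(0,0),(0,0)],
   [(0,0),(0,0),(0,0),(0,0),(0,0),(0,0),(0,0),(0,0)],
   [(0,0),(0,0),(0,0),(0,0),(0,0),(0,0),(0,0),(0,0)]]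

def pvWhiteStepA (White_moves : List ((Int × Int) × (Int × Int)))
    (flag_map : List (List (Int × Int))) (i : Int) : List (List (Int × Int)) :=
  let x_value := (PySem.List.pyGetD White_moves i ((0,0),(0,0))).2.1
  let y_value := (PySem.List.pyGetD White_moves i ((0,0),(0,0))).2.2
  let data := PySem.List.pyGetD (PySem.List.pyGetD flag_map y_value []) x_value (0,0)
  let data2 := (data.1 + 1, data.2)
  PySem.List.pySetD flag_map y_value
    (PySem.List.pySetD (PySem.List.pyGetD flag_map y_value []) x_value data2)

def pvBlackStepA (Black_moves : List ((Int × Int) × (Int × Int)))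
    (flag_map : List (List (Int × Int))) (j : Int) : List (List (Int × Int)) :=
  let x_value := (PySem.List.pyGetD Black_moves j ((0,0),(0,0))).2.1
  let y_value := (PySem.List.pyGetD Black_moves j ((0,0),(0,0))).2.2
  let data := PySem.List.pyGetD (PySem.List.pyGetD flag_map y_value []) x_value (0,0)
  let data2 := (data.1, data.2 + 1)
  PySem.List.pySetD flag_map y_value
    (PySem.List.pySetD (PySem.List.pyGetD flag_map y_value []) x_value data2)

def flag_the_map (White_moves : List ((Int × Int) × (Int × Int))) (Black_moves : List ((Int × Int) × (Int × Int))) : List (List (Int × Int)) :=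
  let g1 := (PySem.List.pyRange 0 (White_moves.length : Int) 1).foldl (pvWhiteStepA White_moves) pvGridA
  (PySem.List.pyRange 0 (Black_moves.length : Int) 1).foldl (pvBlackStepA Black_moves) g1

-- ===== PORT B =====
-- counts[dest] = counts.get(dest, 0) + 1 over one move list (Source B's aggregation loops)
def pvCountDests (moves : List ((Int × Int) × (Int × Int))) : PySem.Dict (Int × Int) Int :=
  moves.foldl (fun d move => d.insert move.2 (d.getD move.2 0 + 1)) PySem.Dict.empty

def pvWriteW (g : List (List (Int × Int))) (kn : (Int × Int) × Int) : List (List (Int × Int)) :=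
  let x := kn.1.1
  let y := kn.1.2
  let wb := PySem.List.pyGetD (PySem.List.pyGetD g y []) x (0,0)
  PySem.List.pySetD g y (PySem.List.pySetD (PySem.List.pyGetD g y []) x (wb.1 + kn.2, wb.2))

def pvWriteB (g : List (List (Int × Int))) (kn : (Int × Int) × Int) : List (List (Int × Int)) :=
  let x := kn.1.1
  let y := kn.1.2
  let wb := PySem.List.pyGetD (PySem.List.pyGetD g y []) x (0,0)
  PySem.List.pySetD g y (PySem.List.pySetD (PySem.List.pyGetD g y []) x (wb.1, wb.2 + kn.2))

def flag_the_map_alt (White_moves : List ((Int × Int) × (Int × Int))) (Black_moves : List ((Int × Int) × (Int × Int))) : List (List (Int × Int)) :=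
  let white_counts := pvCountDests White_moves
  let black_counts := pvCountDests Black_moves
  let g0 := List.replicate 8 (List.replicate 8 ((0 : Int), (0 : Int)))
  let g1 := white_counts.items.foldl pvWriteW g0
  black_counts.items.foldl pvWriteB g1

-- ===== PRECONDITION & SPEC =====
-- Pre_ excludes exactly the inputs on which A raises IndexError: some destination
-- coordinate outside -8..7 (Python list indexing on the 8x8 grid; B raises there too).
def Pre_flag_the_map (White_moves : List ((Int × Int) × (Int × Int))) (Black_moves : List ((Int × Int) × (Int × Int))) : Prop :=
  (∀ mv ∈ White_moves, -8 ≤ mv.2.1 ∧ mv.2.1 < 8 ∧ -8 ≤ mv.2.2 ∧ mv.2.2 < 8) ∧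
  (∀ mv ∈ Black_moves, -8 ≤ mv.2.1 ∧ mv.2.1 < 8 ∧ -8 ≤ mv.2.2 ∧ mv.2.2 < 8)
instance (White_moves : List ((Int × Int) × (Int × Int))) (Black_moves : List ((Int × Int) × (Int × Int))) : Decidable (Pre_flag_the_map White_moves Black_moves) := by unfold Pre_flag_the_map; infer_instance

def pvWitness_flag_the_map : (List ((Int × Int) × (Int × Int))) × (List ((Int × Int) × (Int × Int))) :=
  ([((0,0),(2,3)), ((1,1),(-3,0)), ((4,4),(2,3))], [((7,7),(0,7))])

def Spec_flag_the_map (White_moves : List ((Int × Int) × (Int × Int))) (Black_moves : List ((Int × Int) × (Int × Int))) (out : List (List (Int × Int))) : Prop := out = flag_the_map_alt White_moves Black_moves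
instance (White_moves : List ((Int × Int) × (Int × Int))) (Black_moves : List ((Int × Int) × (Int × Int))) (out : List (List (Int × Int))) : Decidable (Spec_flag_the_map White_moves Black_moves out) := by unfold Spec_flag_the_map; infer_instance

-- ===== CLAIM (what is proved, stated in full; the proofs are below) =====
def Claim_equal_flag_the_map : Prop := ∀ (White_moves : List ((Int × Int) × (Int × Int))) (Black_moves : List ((Int × Int) × (Int × Int))), Dom_flag_the_map White_moves Black_moves → Pre_flag_the_map White_moves Black_moves → Spec_flag_the_map White_moves Black_moves (flag_the_map White_moves Black_moves)

-- ===== LEMMAS AND PROOFS =====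
-- Both sides are shown to equal the canonical grid pvCanon: cell (r,c) holds the pair of
-- per-colour totals of moves whose destination square (with Python's negative-index wrap,
-- i.e. coordinates taken mod 8 on the in-range domain) is (c,r).

def pvIn (k : Int × Int) : Prop := -8 ≤ k.1 ∧ k.1 < 8 ∧ -8 ≤ k.2 ∧ k.2 < 8

def pvCanon (f : Nat → Nat → Int × Int) : List (List (Int × Int)) :=
  (List.range 8).map (fun r => (List.range 8).map (fun c => f r c))

def pvBump (g : List (List (Int × Int))) (k : Int × Int) (δ : Int × Int) : List (List (Int × Int)) :=
  PySem.List.pySetD g k.2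
    (PySem.List.pySetD (PySem.List.pyGetD g k.2 []) k.1
      ((PySem.List.pyGetD (PySem.List.pyGetD g k.2 []) k.1 (0,0)).1 + δ.1,
       (PySem.List.pyGetD (PySem.List.pyGetD g k.2 []) k.1 (0,0)).2 + δ.2))

def pvR (k : Int × Int) : Nat := (k.2.emod 8).toNat
def pvC (k : Int × Int) : Nat := (k.1.emod 8).toNat

def pvSumAt (L : List ((Int × Int) × (Int × Int))) (r c : Nat) : Int × Int :=
  (((L.filter (fun e => pvR e.1 == r && pvC e.1 == c)).map (fun e => e.2.1)).sum,
   ((L.filter (fun e => pvR e.1 == r && pvC e.1 == c)).map (fun e => e.2.2)).sum)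

lemma pv_emod8_lt (i : Int) : (i.emod 8).toNat < 8 := by
  have h0 : i.emod 8 = i % 8 := rfl
  have h1 := Int.emod_nonneg i (by norm_num : (8:Int) ≠ 0)
  have h2 := Int.emod_lt_of_pos i (by norm_num : (0:Int) < 8)
  omega

lemma pv_getD8 {α : Type} (g : List α) (hg : g.length = 8) {i : Int} (h1 : -8 ≤ i) (h2 : i < 8) (d : α) :
    PySem.List.pyGetD g i d = g.getD (i.emod 8).toNat d := by
  have h0 : i.emod 8 = i % 8 := rfl
  have hmod : i.emod 8 = if 0 ≤ i then i else i + 8 := by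
    by_cases h : 0 ≤ i
    · rw [if_pos h, h0]; exact Int.emod_eq_of_lt h h2
    · rw [if_neg h]
      have h8 : (i + 8) % 8 = i + 8 := Int.emod_eq_of_lt (by omega) (by omega)
      have h9 : (i + 8) % 8 = i % 8 := by omega
      omega
  simp only [PySem.List.pyGetD, PySem.List.pyGet?, PySem.List.pyIdx?, hg,
    List.getD_eq_getElem?_getD]
  by_cases h : 0 ≤ i
  · rw [if_pos h, if_pos (by omega : i < ((8:Nat):Int))]
    have : i.toNat = (i.emod 8).toNat := by rw [hmod, if_pos h]
    rw [this]
    simp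
  · rw [if_neg h, if_pos (by omega : -((8:Nat):Int) ≤ i)]
    have : 8 - (-i).toNat = (i.emod 8).toNat := by rw [hmod, if_neg h]; omega
    rw [this]
    simp

lemma pv_setD8 {α : Type} (g : List α) (hg : g.length = 8) {i : Int} (h1 : -8 ≤ i) (h2 : i < 8) (v : α) :
    PySem.List.pySetD g i v = g.set (i.emod 8).toNat v := by
  have h0 : i.emod 8 = i % 8 := rfl
  have hmod : i.emod 8 = if 0 ≤ i then i else i + 8 := by
    by_cases h : 0 ≤ i
    · rw [if_pos h, h0]; exact Int.emod_eq_of_lt h h2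
    · rw [if_neg h]
      have h8 : (i + 8) % 8 = i + 8 := Int.emod_eq_of_lt (by omega) (by omega)
      have h9 : (i + 8) % 8 = i % 8 := by omega
      omega
  simp only [PySem.List.pySetD, PySem.List.pySet?, PySem.List.pyIdx?, hg]
  by_cases h : 0 ≤ i
  · rw [if_pos h, if_pos (by omega : i < ((8:Nat):Int))]
    have : i.toNat = (i.emod 8).toNat := by rw [hmod, if_pos h]
    rw [this]
    simp
  · rw [if_neg h, if_pos (by omega : -((8:Nat):Int) ≤ i)]
    have : 8 - (-i).toNat = (i.emod 8).toNat := by rw [hmod, if_neg h]; omega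
    rw [this]
    simp

lemma pv_set_map_range {α : Type} (n : Nat) (f : Nat → α) (j : Nat) (v : α) (_hj : j < n) :
    ((List.range n).map f).set j v = (List.range n).map (fun i => if i = j then v else f i) := by
  apply List.ext_getElem (by simp)
  intro k h1 h2
  simp only [List.getElem_set, List.getElem_map, List.getElem_range]
  by_cases h : j = k
  · rw [if_pos h, if_pos h.symm]
  · rw [if_neg h, if_neg (fun hh => h hh.symm)]

lemma pv_canon_congr {f f' : Nat → Nat → Int × Int}
    (h : ∀ r c, r < 8 → c < 8 → f r c = f' r c) : pvCanon f = pvCanon f' := by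
  unfold pvCanon
  apply List.map_congr_left
  intro r hr
  apply List.map_congr_left
  intro c hc
  exact h r c (List.mem_range.mp hr) (List.mem_range.mp hc)

lemma pv_getD_canon (f : Nat → Nat → Int × Int) {r : Nat} (hr : r < 8) :
    (pvCanon f).getD r [] = (List.range 8).map (f r) := by
  unfold pvCanon
  rw [List.getD_eq_getElem?_getD]
  simp [hr]

lemma pv_getD_map_range {α : Type} (f : Nat → α) {c : Nat} (hc : c < 8) (d : α) :
    ((List.range 8).map f).getD c d = f c := by
  rw [List.getD_eq_getElem?_getD]
  simp [hc]

lemma pv_bump_canon (f : Nat → Nat → Int × Int) (k : Int × Int) (δ : Int × Int) (hk : pvIn k) :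
    pvBump (pvCanon f) k δ
      = pvCanon (fun r c => if pvR k = r ∧ pvC k = c
          then ((f r c).1 + δ.1, (f r c).2 + δ.2) else f r c) := by
  obtain ⟨h1, h2, h3, h4⟩ := hk
  have hgl : (pvCanon f).length = 8 := by simp [pvCanon]
  unfold pvBump pvR pvC
  rw [pv_getD8 _ hgl h3 h4, pv_setD8 _ hgl h3 h4, pv_getD_canon f (pv_emod8_lt k.2)]
  rw [pv_getD8 _ (by simp) h1 h2, pv_setD8 _ (by simp) h1 h2,
      pv_getD_map_range _ (pv_emod8_lt k.1)]
  rw [pv_set_map_range 8 _ _ _ (pv_emod8_lt k.1)]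
  unfold pvCanon
  rw [pv_set_map_range 8 _ _ _ (pv_emod8_lt (k.2))]
  apply List.map_congr_left
  intro r hr
  by_cases hrk : r = (k.2.emod 8).toNat
  · subst hrk
    rw [if_pos rfl]
    apply List.map_congr_left
    intro c hc
    by_cases hck : c = (k.1.emod 8).toNat
    · subst hck
      simp
    · have hck' : (k.1.emod 8).toNat ≠ c := fun h => hck h.symm
      simp [hck, hck']
  · rw [if_neg hrk]
    apply List.map_congr_left
    intro c hc
    have hrk' : (k.2.emod 8).toNat ≠ r := fun h => hrk h.symm
    simp [hrk']

lemma pv_foldl_bump : ∀ (L : List ((Int × Int) × (Int × Int))) (f : Nat → Nat → Int × Int),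
    (∀ e ∈ L, pvIn e.1) →
    L.foldl (fun g e => pvBump g e.1 e.2) (pvCanon f)
      = pvCanon (fun r c => ((f r c).1 + (pvSumAt L r c).1, (f r c).2 + (pvSumAt L r c).2)) := by
  intro L
  induction L with
  | nil =>
    intro f _
    simp only [List.foldl_nil]
    apply pv_canon_congr
    intro r c _ _
    simp [pvSumAt]
  | cons e L ih =>
    intro f h
    rw [List.foldl_cons, pv_bump_canon f e.1 e.2 (h e List.mem_cons_self)]
    rw [ih _ (fun e' he' => h e' (List.mem_cons_of_mem _ he'))]
    apply pv_canon_congr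
    intro r c hr hc
    by_cases hrc : pvR e.1 = r ∧ pvC e.1 = c
    · simp only [if_pos hrc]
      simp [pvSumAt, hrc.1, hrc.2]
      constructor <;> ring
    · simp only [if_neg hrc]
      have hfilt : (pvR e.1 == r && pvC e.1 == c) = false := by
        rw [Bool.and_eq_false_iff]
        by_cases h1 : pvR e.1 = r
        · right; simp [beq_eq_false_iff_ne]; exact fun hc' => hrc ⟨h1, hc'⟩
        · left; simp [beq_eq_false_iff_ne]; exact h1
      simp [pvSumAt, hfilt]

lemma pv_count_inst (x : Int × Int) (l : List (Int × Int)) :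
    @List.count _ instBEqProd x l = @List.count _ instBEqOfDecidableEq x l := by
  induction l with
  | nil => rfl
  | cons a l ih => by_cases h : a = x <;> simp [ih, h]

lemma pv_group (ks : List (Int × Int)) (p : (Int × Int) → Bool) :
    (((PySem.Set.ofList ks).filter p).map (fun k => ((ks.count k : Nat) : Int))).sum
      = ((ks.countP p : Nat) : Int) := by
  have hnd : (PySem.Set.ofList ks).Nodup := PySem.Set.nodup_ofList ks
  have hnd2 : ((PySem.Set.ofList ks).filter p).Nodup := hnd.filter p
  rw [← List.sum_toFinset _ hnd2]
  have hfs : ((PySem.Set.ofList ks).filter p).toFinset = (ks.filter p).toFinset := by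
    ext a
    simp [PySem.Set.mem_ofList]
  rw [hfs]
  have hcnt : ∀ a ∈ (ks.filter p).toFinset, ((ks.count a : Nat) : Int) = (((ks.filter p).count a : Nat) : Int) := by
    intro a ha
    have hpa : p a = true := (List.mem_filter.mp (List.mem_toFinset.mp ha)).2
    rw [List.count_filter]
    simp [hpa]
  rw [Finset.sum_congr rfl hcnt]
  rw [List.countP_eq_length_filter]
  have hms := Multiset.toFinset_sum_count_eq (ι := Int × Int) ((ks.filter p : List (Int × Int)) : Multiset (Int × Int))
  norm_cast
  have hstep : ∑ x ∈ (List.filter p ks).toFinset, @List.count _ instBEqProd x (ks.filter p)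
      = ∑ x ∈ (List.filter p ks).toFinset, @List.count _ instBEqOfDecidableEq x (ks.filter p) :=
    Finset.sum_congr rfl (fun x _ => pv_count_inst x (ks.filter p))
  rw [hstep]
  simpa using hms

-- ===== reduction lemmas =====

lemma pv_sum_ones {α : Type} (l : List α) : (l.map (fun _ => (1:Int))).sum = l.length := by
  induction l with
  | nil => simp
  | cons a l ih => simp; omega

lemma pv_sum_zeros {α : Type} (l : List α) : (l.map (fun _ => (0:Int))).sum = 0 := by
  simp

lemma pv_grid0 : pvGridA = pvCanon (fun _ _ => (0,0)) := by decide

lemma pv_grid0' : List.replicate 8 (List.replicate 8 ((0 : Int), (0 : Int))) = pvCanon (fun _ _ => (0,0)) := by decide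

lemma pv_whiteStep_eq (W : List ((Int × Int) × (Int × Int))) :
    pvWhiteStepA W = fun g i => pvBump g (PySem.List.pyGetD W i ((0,0),(0,0))).2 (1,0) := by
  funext g i
  simp [pvWhiteStepA, pvBump]

lemma pv_blackStep_eq (B : List ((Int × Int) × (Int × Int))) :
    pvBlackStepA B = fun g i => pvBump g (PySem.List.pyGetD B i ((0,0),(0,0))).2 (0,1) := by
  funext g i
  simp [pvBlackStepA, pvBump]

lemma pv_A_white (W : List ((Int × Int) × (Int × Int))) (g0 : List (List (Int × Int))) :
    (PySem.List.pyRange 0 (W.length : Int) 1).foldl (pvWhiteStepA W) g0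
      = (W.map (fun mv => (mv.2, ((1:Int),(0:Int))))).foldl (fun g e => pvBump g e.1 e.2) g0 := by
  rw [pv_whiteStep_eq, List.foldl_map]
  exact PySem.List.foldl_pyRange_zero_pyGetD' W ((0,0),(0,0)) (fun g mv => pvBump g mv.2 (1,0)) g0

lemma pv_A_black (B : List ((Int × Int) × (Int × Int))) (g0 : List (List (Int × Int))) :
    (PySem.List.pyRange 0 (B.length : Int) 1).foldl (pvBlackStepA B) g0
      = (B.map (fun mv => (mv.2, ((0:Int),(1:Int))))).foldl (fun g e => pvBump g e.1 e.2) g0 := by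
  rw [pv_blackStep_eq, List.foldl_map]
  exact PySem.List.foldl_pyRange_zero_pyGetD' B ((0,0),(0,0)) (fun g mv => pvBump g mv.2 (0,1)) g0

lemma pv_countDests_eq (W : List ((Int × Int) × (Int × Int))) :
    pvCountDests W = PySem.Dict.counter (W.map (·.2)) := by
  unfold pvCountDests
  rw [← PySem.Dict.foldl_insert_getD_add_one_eq_counter, List.foldl_map]

lemma pv_B_white (W : List ((Int × Int) × (Int × Int))) (g0 : List (List (Int × Int))) :
    (pvCountDests W).items.foldl pvWriteW g0
      = ((PySem.Set.ofList (W.map (·.2))).map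
          (fun k => (k, (((W.map (·.2)).count k : Nat) : Int), (0:Int)))).foldl
            (fun g e => pvBump g e.1 e.2) g0 := by
  rw [pv_countDests_eq, PySem.Dict.items_counter]
  rw [List.foldl_map, List.foldl_map]
  apply PySem.List.foldl_congr_mem
  intro g k hk
  simp [pvWriteW, pvBump]

lemma pv_B_black (B : List ((Int × Int) × (Int × Int))) (g0 : List (List (Int × Int))) :
    (pvCountDests B).items.foldl pvWriteB g0
      = ((PySem.Set.ofList (B.map (·.2))).map
          (fun k => (k, (0:Int), (((B.map (·.2)).count k : Nat) : Int)))).foldl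
            (fun g e => pvBump g e.1 e.2) g0 := by
  rw [pv_countDests_eq, PySem.Dict.items_counter]
  rw [List.foldl_map, List.foldl_map]
  apply PySem.List.foldl_congr_mem
  intro g k hk
  simp [pvWriteB, pvBump]

lemma pv_sumAt_white_A (W : List ((Int × Int) × (Int × Int))) (r c : Nat) :
    pvSumAt (W.map (fun mv => (mv.2, ((1:Int),(0:Int))))) r c
      = ((((W.map (·.2)).countP (fun k => pvR k == r && pvC k == c) : Nat) : Int), 0) := by
  unfold pvSumAt
  rw [Prod.mk.injEq]
  simp only [List.filter_map, List.map_map, Function.comp_def]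
  refine ⟨?_, ?_⟩
  · rw [pv_sum_ones, List.countP_map, List.countP_eq_length_filter]
    simp [Function.comp_def]
  · rw [pv_sum_zeros]

lemma pv_sumAt_black_A (B : List ((Int × Int) × (Int × Int))) (r c : Nat) :
    pvSumAt (B.map (fun mv => (mv.2, ((0:Int),(1:Int))))) r c
      = (0, (((B.map (·.2)).countP (fun k => pvR k == r && pvC k == c) : Nat) : Int)) := by
  unfold pvSumAt
  rw [Prod.mk.injEq]
  simp only [List.filter_map, List.map_map, Function.comp_def]
  refine ⟨?_, ?_⟩
  · rw [pv_sum_zeros]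
  · rw [pv_sum_ones, List.countP_map, List.countP_eq_length_filter]
    simp [Function.comp_def]

lemma pv_sumAt_white_B (ds : List (Int × Int)) (r c : Nat) :
    pvSumAt ((PySem.Set.ofList ds).map (fun k => (k, ((ds.count k : Nat) : Int), (0:Int)))) r c
      = (((ds.countP (fun k => pvR k == r && pvC k == c) : Nat) : Int), 0) := by
  unfold pvSumAt
  rw [Prod.mk.injEq]
  simp only [List.filter_map, List.map_map, Function.comp_def]
  refine ⟨?_, ?_⟩
  · rw [← pv_group ds (fun k => pvR k == r && pvC k == c)]
  · rw [pv_sum_zeros]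

lemma pv_sumAt_black_B (ds : List (Int × Int)) (r c : Nat) :
    pvSumAt ((PySem.Set.ofList ds).map (fun k => (k, (0:Int), ((ds.count k : Nat) : Int)))) r c
      = (0, ((ds.countP (fun k => pvR k == r && pvC k == c) : Nat) : Int)) := by
  unfold pvSumAt
  rw [Prod.mk.injEq]
  simp only [List.filter_map, List.map_map, Function.comp_def]
  refine ⟨?_, ?_⟩
  · rw [pv_sum_zeros]
  · rw [← pv_group ds (fun k => pvR k == r && pvC k == c)]

theorem pv_main (W B : List ((Int × Int) × (Int × Int))) (pre : Pre_flag_the_map W B) :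
    flag_the_map W B = flag_the_map_alt W B := by
  obtain ⟨preW, preB⟩ := pre
  have hWev : ∀ e ∈ W.map (fun mv => (mv.2, ((1:Int),(0:Int)))), pvIn e.1 := by
    intro e he
    obtain ⟨mv, hmv, rfl⟩ := List.mem_map.mp he
    exact preW mv hmv
  have hBev : ∀ e ∈ B.map (fun mv => (mv.2, ((0:Int),(1:Int)))), pvIn e.1 := by
    intro e he
    obtain ⟨mv, hmv, rfl⟩ := List.mem_map.mp he
    exact preB mv hmv
  have hWev' : ∀ e ∈ (PySem.Set.ofList (W.map (·.2))).map
      (fun k => (k, (((W.map (·.2)).count k : Nat) : Int), (0:Int))), pvIn e.1 := by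
    intro e he
    obtain ⟨k, hk, rfl⟩ := List.mem_map.mp he
    obtain ⟨mv, hmv, rfl⟩ := List.mem_map.mp ((PySem.Set.mem_ofList _ _).mp hk)
    exact preW mv hmv
  have hBev' : ∀ e ∈ (PySem.Set.ofList (B.map (·.2))).map
      (fun k => (k, (0:Int), (((B.map (·.2)).count k : Nat) : Int))), pvIn e.1 := by
    intro e he
    obtain ⟨k, hk, rfl⟩ := List.mem_map.mp he
    obtain ⟨mv, hmv, rfl⟩ := List.mem_map.mp ((PySem.Set.mem_ofList _ _).mp hk)
    exact preB mv hmv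
  show (PySem.List.pyRange 0 (B.length : Int) 1).foldl (pvBlackStepA B)
        ((PySem.List.pyRange 0 (W.length : Int) 1).foldl (pvWhiteStepA W) pvGridA)
      = (pvCountDests B).items.foldl pvWriteB
        ((pvCountDests W).items.foldl pvWriteW (List.replicate 8 (List.replicate 8 ((0:Int),(0:Int)))))
  rw [pv_A_white, pv_grid0, pv_foldl_bump _ _ hWev, pv_A_black, pv_foldl_bump _ _ hBev]
  rw [pv_B_white, pv_grid0', pv_foldl_bump _ _ hWev', pv_B_black, pv_foldl_bump _ _ hBev']
  apply pv_canon_congr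
  intro r c hr hc
  rw [pv_sumAt_white_A, pv_sumAt_black_A, pv_sumAt_white_B, pv_sumAt_black_B]

-- ===== VERDICT (by name: the statement is the Claim_ definition above) =====
theorem flag_the_map_spec : Claim_equal_flag_the_map := by
  intro White_moves Black_moves _ pre
  unfold Spec_flag_the_map
  exact pv_main White_moves Black_moves pre
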